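-- pv_equiv track=rewrite | github.com/JRA2002/python_problems | arrays/geeksforgeeks/move_negative.py | move_negative
-- ===== SOURCE A (Python) =====
-- def move_negative(arr: list):
--     neg = []
--     pos = []
--     for i in arr:
--         if i < 0:
--             neg.append(i)
--         else:
--             pos.append(i)
--     i = 0
--     k = 0
--     j = 0
--     while i < len(pos):
--         arr[k] = pos[i]
--         i += 1
--         k += 1
--
--     while j < len(neg):
--         arr[k] = neg[j]
--         j += 1
--         k += 1
--     return arr
-- ===== SOURCE B (Python) =====
-- def move_negative(arr: list):
--     arr[:] = sorted(arr, key=lambda x: x < 0)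
--     return arr
-- ===== Notes on version B (the rewrite author's own statement) =====
-- stated objective: simpler
-- what changed: Replaces the explicit two-bucket partition plus index write-back loops with a single stable sort on the boolean key x < 0, written back via arr[:] so the same list object is mutated and returned.
import Mathlib
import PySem

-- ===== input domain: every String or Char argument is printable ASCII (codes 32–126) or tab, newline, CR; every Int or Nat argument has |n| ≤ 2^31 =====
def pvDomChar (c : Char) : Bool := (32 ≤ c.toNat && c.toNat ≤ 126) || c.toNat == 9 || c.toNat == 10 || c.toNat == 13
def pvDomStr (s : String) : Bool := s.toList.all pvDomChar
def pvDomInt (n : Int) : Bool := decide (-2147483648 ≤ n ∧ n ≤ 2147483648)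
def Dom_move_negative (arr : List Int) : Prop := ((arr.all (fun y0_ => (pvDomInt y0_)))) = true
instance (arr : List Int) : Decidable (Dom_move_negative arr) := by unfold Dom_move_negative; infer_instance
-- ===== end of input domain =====

-- B replaces A's two-bucket partition and index write-back with one stable sort on the
-- boolean key x < 0 (simpler); both mutate arr in place in Python, equivalence is about the return value.

-- ===== PORT A =====
-- the two while loops: successively assign arr[k] = xs[i], k and i advancing together
def pvWriteA (a : List Int) : List Int → Nat → List Int
  | [], _ => a
  | x :: xs, k => pvWriteA (a.set k x) xs (k + 1)

def move_negative (arr : List Int) : List Int :=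
  let np := arr.foldl (fun (p : List Int × List Int) i =>
    if i < 0 then (p.1 ++ [i], p.2) else (p.1, p.2 ++ [i])) ([], [])
  let neg := np.1
  let pos := np.2
  let arr1 := pvWriteA arr pos 0
  let arr2 := pvWriteA arr1 neg pos.length
  arr2

-- ===== PORT B =====
def move_negative_alt (arr : List Int) : List Int :=
  PySem.List.sorted arr (fun x => decide (x < 0)) false

-- ===== PRECONDITION & SPEC =====
def Spec_move_negative (arr : List Int) (out : List Int) : Prop := out = move_negative_alt arr
instance (arr : List Int) (out : List Int) : Decidable (Spec_move_negative arr out) := by unfold Spec_move_negative; infer_instance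

-- ===== CLAIM (what is proved, stated in full; the proofs are below) =====
def Claim_equal_move_negative : Prop := ∀ (arr : List Int), Dom_move_negative arr → Spec_move_negative arr (move_negative arr)

-- ===== LEMMAS AND PROOFS =====

theorem pv_partition_foldl (xs n p : List Int) :
    xs.foldl (fun (q : List Int × List Int) i =>
      if i < 0 then (q.1 ++ [i], q.2) else (q.1, q.2 ++ [i])) (n, p)
    = (n ++ xs.filter (fun i => decide (i < 0)), p ++ xs.filter (fun i => !decide (i < 0))) := by
  induction xs generalizing n p with
  | nil => simp
  | cons x xs ih =>
    by_cases h : x < 0 <;> simp [h, ih]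

theorem pv_writeA_spec (xs : List Int) : ∀ (a : List Int) (k : Nat),
    k + xs.length ≤ a.length →
    pvWriteA a xs k = a.take k ++ xs ++ a.drop (k + xs.length) := by
  induction xs with
  | nil => intro a k h; simp [pvWriteA]
  | cons x xs ih =>
    intro a k h
    simp only [List.length_cons] at h
    rw [pvWriteA, ih _ (k + 1) (by simp [List.length_set]; omega)]
    have hk : k < a.length := by omega
    have htake : ((a.set k x).take (k+1)) = a.take k ++ [x] := by
      rw [List.take_add_one]
      simp [List.take_set, hk,
        List.set_eq_of_length_le (l := a.take k) (i := k) (by simp)]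
    have hdrop : ((a.set k x).drop (k + 1 + xs.length)) = a.drop (k + 1 + xs.length) :=
      List.drop_set_of_lt (by omega)
    rw [htake, hdrop]
    simp [List.append_assoc]
    omega

theorem pv_insertBy_all_false {α : Type} (before : α → α → Bool) (x : α) (l : List α)
    (h : ∀ y ∈ l, before x y = false) :
    PySem.List.insertBy before x l = l ++ [x] := by
  induction l with
  | nil => rfl
  | cons y ys ih =>
    have := h y (by simp)
    simp [PySem.List.insertBy, this, ih (fun z hz => h z (by simp [hz]))]

theorem pv_insertBy_mid {α : Type} (before : α → α → Bool) (x : α) (P N : List α)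
    (hP : ∀ y ∈ P, before x y = false) (hN : ∀ y ∈ N, before x y = true) :
    PySem.List.insertBy before x (P ++ N) = P ++ x :: N := by
  induction P with
  | nil =>
    cases N with
    | nil => rfl
    | cons y ys => simp [PySem.List.insertBy, hN y (by simp)]
  | cons p ps ih =>
    simp [PySem.List.insertBy, hP p (by simp), ih (fun z hz => hP z (by simp [hz]))]

theorem pv_sorted_bool (xs : List Int) : ∀ (P N : List Int),
    (∀ y ∈ P, ¬ y < 0) → (∀ y ∈ N, y < 0) →
    xs.foldl (fun acc x =>
        PySem.List.insertBy (fun a b => decide ((decide (a < 0) : Bool) < (decide (b < 0) : Bool))) x acc)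
      (P ++ N)
    = (P ++ xs.filter (fun i => !decide (i < 0))) ++ (N ++ xs.filter (fun i => decide (i < 0))) := by
  induction xs with
  | nil => intro P N _ _; simp
  | cons x xs ih =>
    intro P N hP hN
    by_cases hx : x < 0
    · have : PySem.List.insertBy (fun a b => decide ((decide (a < 0) : Bool) < (decide (b < 0) : Bool))) x (P ++ N) = (P ++ N) ++ [x] := by
        apply pv_insertBy_all_false
        intro y _; simp [hx]
      rw [List.foldl_cons, this]
      have := ih P (N ++ [x]) hP (by intro y hy; rcases List.mem_append.1 hy with h | h; exact hN y h; simp at h; simpa [h] using hx)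
      simpa [List.append_assoc, hx] using this
    · have : PySem.List.insertBy (fun a b => decide ((decide (a < 0) : Bool) < (decide (b < 0) : Bool))) x (P ++ N) = (P ++ [x]) ++ N := by
        rw [pv_insertBy_mid]
        · simp
        · intro y hy; simp [hx, hP y hy]
        · intro y hy; simp [hx, hN y hy]
      rw [List.foldl_cons, this]
      have := ih (P ++ [x]) N (by intro y hy; rcases List.mem_append.1 hy with h | h; exact hP y h; simp at h; simpa [h] using hx) hN
      simpa [List.append_assoc, hx] using this

-- ===== VERDICT (by name: the statement is the Claim_ definition above) =====
theorem move_negative_spec : Claim_equal_move_negative := by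
  intro arr _
  unfold Spec_move_negative move_negative move_negative_alt
  simp only [PySem.List.sorted]
  have hpart := pv_partition_foldl arr [] []
  simp only [List.nil_append] at hpart
  have hsorted := pv_sorted_bool arr [] [] (by simp) (by simp)
  simp only [List.nil_append] at hsorted
  rw [hpart]
  simp only []
  have hlen : (arr.filter (fun i => !decide (i < 0))).length
      + (arr.filter (fun i => decide (i < 0))).length = arr.length := by
    have := (List.length_eq_length_filter_add (l := arr) (f := fun i => !decide (i < 0))).symm
    simpa using this
  rw [pv_writeA_spec _ _ 0 (by omega)]
  simp only [List.take_zero, List.nil_append, Nat.zero_add]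
  rw [pv_writeA_spec]
  · simp only [Bool.false_eq_true, if_false]
    rw [hsorted, List.take_left]
    have hnil : List.drop
        ((arr.filter (fun i => !decide (i < 0))).length + (arr.filter (fun i => decide (i < 0))).length)
        (arr.filter (fun i => !decide (i < 0)) ++ List.drop (arr.filter (fun i => !decide (i < 0))).length arr) = [] := by
      apply List.drop_eq_nil_of_le
      simp [List.length_drop]
      omega
    rw [hnil]
    simp
  · simp
    omega
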